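-- pv_equiv track=rewrite | github.com/nuprl/MultiPL-T | target_lang_postprocessing/merge_with_originals.py | get_impl
-- ===== SOURCE A (Python) =====
-- def get_impl(code: str):
--     lines = code.split("\n")
--     save = []
--     for line in lines:
--         if "### Canonical solution below ###" in line:
--             continue
--         if "### Unit tests below ###" in line:
--             break
--         save.append(line)
--
--     return "\n".join(save).strip()
-- ===== SOURCE B (Python) =====
-- def get_impl(code: str):
--     kept = [l for l in code.split("\n") if "### Canonical solution below ###" not in l]
--     cut = next((i for i, l in enumerate(kept) if "### Unit tests below ###" in l), len(kept))
--     return "\n".join(kept[:cut]).strip()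
-- ===== Notes on version B (the rewrite author's own statement) =====
-- stated objective: simpler
-- what changed: Replaces A's single interleaved continue/break loop with two declarative phases: a comprehension filtering out canonical-marker lines, then a next/enumerate scan locating the first unit-test-marker line as a cutoff index for slicing.
import Mathlib
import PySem

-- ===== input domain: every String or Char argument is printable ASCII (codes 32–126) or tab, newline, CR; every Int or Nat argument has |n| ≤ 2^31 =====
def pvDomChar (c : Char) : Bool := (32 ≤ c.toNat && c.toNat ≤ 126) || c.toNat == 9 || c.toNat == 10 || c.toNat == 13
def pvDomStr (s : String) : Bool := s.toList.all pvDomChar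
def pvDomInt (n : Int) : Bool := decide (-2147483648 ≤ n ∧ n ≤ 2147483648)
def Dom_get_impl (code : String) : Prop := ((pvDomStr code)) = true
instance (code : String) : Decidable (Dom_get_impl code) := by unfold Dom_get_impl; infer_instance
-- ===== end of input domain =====

-- B extracts the implementation in two declarative phases (filter canonical-marker
-- lines, then cut at the first unit-test-marker line) instead of A's single
-- interleaved continue/break loop; same cost, simpler decomposition.

-- ===== PORT A =====
-- marker tests ('marker in line'); split? "\n" always returns some since the separator is nonempty
def hasCanonical (l : String) : Bool := PySem.Str.isIn "### Canonical solution below ###" l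
def hasUnitTests (l : String) : Bool := PySem.Str.isIn "### Unit tests below ###" l
def splitNL (code : String) : List String := (PySem.Str.split? code "\n").getD []

-- A's for-loop with continue/break and the `save` accumulator
def getImplLoopA : List String → List String → List String
  | [], save => save
  | l :: rest, save =>
    if hasCanonical l then
      getImplLoopA rest save
    else if hasUnitTests l then
      save
    else
      getImplLoopA rest (save ++ [l])

def get_impl (code : String) : String :=
  PySem.Str.strip (PySem.Str.join "\n" (getImplLoopA (splitNL code) []))

-- ===== PORT B =====
def get_impl_alt (code : String) : String :=
  let kept := (splitNL code).filter (fun l => !hasCanonical l)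
  let cut := kept.findIdx (fun l => hasUnitTests l)
  PySem.Str.strip (PySem.Str.join "\n" (kept.take cut))

-- ===== PRECONDITION & SPEC =====
def Spec_get_impl (code : String) (out : String) : Prop := out = get_impl_alt code
instance (code : String) (out : String) : Decidable (Spec_get_impl code out) := by unfold Spec_get_impl; infer_instance

-- ===== CLAIM (what is proved, stated in full; the proofs are below) =====
def Claim_equal_get_impl : Prop := ∀ (code : String), Dom_get_impl code → Spec_get_impl code (get_impl code)

-- ===== LEMMAS AND PROOFS =====

-- A's loop = prefix of the canonical-filtered lines up to the first unit-test line
theorem getImplLoopA_eq (lines save : List String) :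
    getImplLoopA lines save =
      save ++
        (let kept := lines.filter (fun l => !hasCanonical l)
         kept.take (kept.findIdx (fun l => hasUnitTests l))) := by
  induction lines generalizing save with
  | nil => simp [getImplLoopA]
  | cons l rest ih =>
    cases hc : hasCanonical l with
    | true => simp [getImplLoopA, hc, ih]
    | false =>
      cases hu : hasUnitTests l with
      | true => simp [getImplLoopA, hc, hu, List.findIdx_cons]
      | false => simp [getImplLoopA, hc, hu, ih, List.findIdx_cons]

-- ===== VERDICT (by name: the statement is the Claim_ definition above) =====
theorem get_impl_spec : Claim_equal_get_impl := by
  intro code _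
  unfold Spec_get_impl get_impl get_impl_alt
  rw [getImplLoopA_eq]
  simp
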